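-- pv_equiv track=rewrite | github.com/Steinz0/AI-Path-Optimizer | algo.py | solution
-- ===== SOURCE A (Python) =====
-- def solution(res):
--     #Permet de recontruire le chemin sans tout les noeuds intermediares
--     if not(res) or res==[]:
--         return "Aucun chemin"
--     way = res[0][0]
--     for i in range(len(res)-1):
--         if res[i][0] != res[i+1][0]:
--             way += ' --' + str(res[i][1]) + '--> ' + res[i+1][0]
--     return way
-- ===== SOURCE B (Python) =====
-- def solution(res):
--     if not res:
--         return "Aucun chemin"
--     # first pass: last tuple of each maximal run of consecutive equal nodes
--     runs = []
--     for p in res: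
--         if runs and runs[-1][0] == p[0]:
--             runs[-1] = p
--         else:
--             runs.append(p)
--     # second pass: one segment per adjacent pair of runs
--     parts = [runs[0][0]] + [' --' + str(prev[1]) + '--> ' + nxt[0]
--                             for prev, nxt in zip(runs, runs[1:])]
--     return ''.join(parts)
-- ===== Notes on version B (the rewrite author's own statement) =====
-- stated objective: alternative
-- what changed: B replaces A's single scan over index pairs res[i],res[i+1] with a two-pass decomposition: first collapse the list into the last tuple of each maximal run of consecutive equal nodes, then join one transition segment per adjacent pair of runs.
import Mathlib
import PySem

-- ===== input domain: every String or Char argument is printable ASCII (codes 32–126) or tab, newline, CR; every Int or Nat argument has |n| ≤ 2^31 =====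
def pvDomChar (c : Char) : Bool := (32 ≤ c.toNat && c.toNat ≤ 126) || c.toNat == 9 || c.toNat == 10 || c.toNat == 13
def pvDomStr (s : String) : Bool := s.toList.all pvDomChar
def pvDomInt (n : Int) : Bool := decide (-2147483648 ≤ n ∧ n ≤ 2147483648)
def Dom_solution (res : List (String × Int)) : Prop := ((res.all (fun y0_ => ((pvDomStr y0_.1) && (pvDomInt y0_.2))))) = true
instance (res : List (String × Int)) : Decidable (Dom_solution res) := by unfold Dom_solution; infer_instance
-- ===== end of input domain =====

-- B re-derives the path in two passes (collapse consecutive equal nodes into runs, then join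
-- transitions between adjacent runs) instead of A's single index-pair scan; objective: alternative decomposition, same cost.

-- ===== PORT A =====
def solution (res : List (String × Int)) : String :=
  if res = [] then "Aucun chemin"
  else
    (PySem.List.pyRange 0 (PySem.List.len res - 1) 1).foldl
      (fun way i =>
        if (PySem.List.pyGetD res i ("", 0)).1 ≠ (PySem.List.pyGetD res (i + 1) ("", 0)).1 then
          way ++ " --" ++ PySem.Int.toStr (PySem.List.pyGetD res i ("", 0)).2 ++ "--> "
            ++ (PySem.List.pyGetD res (i + 1) ("", 0)).1
        else way)
      (PySem.List.pyGetD res 0 ("", 0)).1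

-- ===== PORT B =====
-- one step of Source B's run-building loop (replace the last run's tuple, or open a new run)
def runsOfStep (runs : List (String × Int)) (p : String × Int) : List (String × Int) :=
  match runs.getLast? with
  | some r => if r.1 = p.1 then runs.dropLast ++ [p] else runs ++ [p]
  | none => runs ++ [p]

-- first pass of Source B: the last tuple of each maximal run of consecutive equal nodes
def runsOf (res : List (String × Int)) : List (String × Int) :=
  res.foldl runsOfStep []

-- one segment of Source B's comprehension
def segOf (pr : (String × Int) × (String × Int)) : String :=
  " --" ++ PySem.Int.toStr pr.1.2 ++ "--> " ++ pr.2.1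

def solution_alt (res : List (String × Int)) : String :=
  if res = [] then "Aucun chemin"
  else
    let runs := runsOf res
    PySem.Str.join "" ([(runs.headD ("", 0)).1] ++ (runs.zip runs.tail).map segOf)

-- ===== PRECONDITION & SPEC =====
def Spec_solution (res : List (String × Int)) (out : String) : Prop := out = solution_alt res
instance (res : List (String × Int)) (out : String) : Decidable (Spec_solution res out) := by unfold Spec_solution; infer_instance

-- ===== CLAIM (what is proved, stated in full; the proofs are below) =====
def Claim_equal_solution : Prop := ∀ (res : List (String × Int)), Dom_solution res → Spec_solution res (solution res)

-- ===== LEMMAS AND PROOFS =====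

-- proof-side characterisation of runsOf: structural recursion keeping an element iff the next node differs
def runsR : List (String × Int) → List (String × Int)
  | [] => []
  | [p] => [p]
  | p :: q :: t => if p.1 = q.1 then runsR (q :: t) else p :: runsR (q :: t)

lemma inter_nil (l : List (List Char)) : ([] : List Char).intercalate l = l.flatten := by
  simp [List.intercalate]
  induction l with
  | nil => simp
  | cons x t ih => cases t <;> simp_all [List.intersperse]

lemma join_empty : PySem.Str.join "" ([] : List String) = "" := by
  simp [PySem.Str.join, PySem.Chars.join, inter_nil]

lemma join_cons (x : String) (xs : List String) :
    PySem.Str.join "" (x :: xs) = x ++ PySem.Str.join "" xs := by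
  simp [PySem.Str.join, PySem.Chars.join, inter_nil, String.ofList_append]

lemma foldl_seg (ps : List ((String × Int) × (String × Int))) :
    ∀ acc : String,
      ps.foldl (fun a pr => a ++ " --" ++ PySem.Int.toStr pr.1.2 ++ "--> " ++ pr.2.1) acc
        = acc ++ PySem.Str.join "" (ps.map segOf) := by
  induction ps with
  | nil => intro acc; simp [join_empty]
  | cons pr ps ih =>
      intro acc
      rw [List.foldl_cons, ih, List.map_cons, join_cons]
      simp only [segOf, String.append_assoc]

lemma foldl_range_pairs {β : Type} (f : β → (String × Int) → (String × Int) → β)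
    (d : String × Int) :
    ∀ (l : List (String × Int)) (acc : β),
      (List.range (l.length - 1)).foldl (fun a k => f a (l.getD k d) (l.getD (k + 1) d)) acc
        = (l.zip l.tail).foldl (fun a pr => f a pr.1 pr.2) acc := by
  intro l
  induction l with
  | nil => intro acc; simp
  | cons p t ih =>
      cases t with
      | nil => intro acc; simp
      | cons q t' =>
          intro acc
          have h1 : (p :: q :: t').length - 1 = t'.length + 1 := by simp
          rw [h1, List.range_succ_eq_map, List.foldl_cons, List.foldl_map]
          have h2 : ∀ (a : β) (k : Nat),
              f a ((p :: q :: t').getD (k + 1) d) ((p :: q :: t').getD (k + 1 + 1) d)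
                = f a ((q :: t').getD k d) ((q :: t').getD (k + 1) d) := by
            intro a k; rfl
          simp only [Nat.succ_eq_add_one, h2]
          have h3 := ih (f acc p q)
          simp only [List.length_cons, Nat.add_sub_cancel] at h3
          simpa using h3

lemma solution_char (p : String × Int) (t : List (String × Int)) :
    solution (p :: t)
      = p.1 ++ PySem.Str.join ""
          ((((p :: t).zip t).filter (fun pr => decide (pr.1.1 ≠ pr.2.1))).map segOf) := by
  unfold solution
  rw [if_neg (List.cons_ne_nil p t), PySem.List.pyRange_one]
  simp only [PySem.List.len_eq, sub_zero, List.foldl_map, zero_add]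
  have hlen : (((p :: t).length : Int) - 1).toNat = (p :: t).length - 1 := by
    omega
  rw [hlen]
  simp only [← Nat.cast_add_one, PySem.List.pyGetD_natCast, PySem.List.pyGetD_zero_cons]
  rw [foldl_range_pairs
      (fun a x y => if x.1 ≠ y.1 then a ++ " --" ++ PySem.Int.toStr x.2 ++ "--> " ++ y.1 else a)
      ("", 0) (p :: t) p.1]
  rw [PySem.List.foldl_ite_eq_foldl_filter]
  rw [foldl_seg]
  rfl

lemma fold_runs : ∀ (l ys : List (String × Int)) (r : String × Int),
    l.foldl runsOfStep (ys ++ [r]) = ys ++ runsR (r :: l) := by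
  intro l
  induction l with
  | nil => intro ys r; simp [runsR]
  | cons p l' ih =>
      intro ys r
      simp only [List.foldl_cons]
      by_cases h : r.1 = p.1
      · have : runsOfStep (ys ++ [r]) p = ys ++ [p] := by
          simp [runsOfStep, h]
        rw [this, ih ys p]
        simp [runsR, h]
      · have : runsOfStep (ys ++ [r]) p = (ys ++ [r]) ++ [p] := by
          simp [runsOfStep, h]
        rw [this, ih (ys ++ [r]) p]
        simp [runsR, h]

lemma runsOf_eq (p : String × Int) (t : List (String × Int)) :
    runsOf (p :: t) = runsR (p :: t) := by
  unfold runsOf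
  simp only [List.foldl_cons]
  have h0 : runsOfStep [] p = [] ++ [p] := by simp [runsOfStep]
  rw [h0, fold_runs t [] p]
  rfl

lemma runsR_ne_nil (p : String × Int) (t : List (String × Int)) : runsR (p :: t) ≠ [] := by
  induction t generalizing p with
  | nil => simp [runsR]
  | cons q t' ih =>
      simp only [runsR]
      split
      · exact ih q
      · simp

lemma runsR_head1 (p : String × Int) (t : List (String × Int)) (d : String × Int) :
    ((runsR (p :: t)).headD d).1 = p.1 := by
  induction t generalizing p with
  | nil => simp [runsR]
  | cons q t' ih =>
      simp only [runsR]
      split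
      · rename_i h; rw [ih q]; exact h.symm
      · simp

lemma segs_eq (p : String × Int) (t : List (String × Int)) :
    ((runsR (p :: t)).zip (runsR (p :: t)).tail).map segOf
      = (((p :: t).zip t).filter (fun pr => decide (pr.1.1 ≠ pr.2.1))).map segOf := by
  induction t generalizing p with
  | nil => simp [runsR]
  | cons q t' ih =>
      by_cases h : p.1 = q.1
      · simp only [runsR, if_pos h, List.zip_cons_cons, List.filter_cons]
        have : (decide (p.1 ≠ q.1)) = false := by simp [h]
        rw [this]
        simpa using ih q
      · simp only [runsR, if_neg h]
        obtain ⟨r, rs, hr⟩ : ∃ r rs, runsR (q :: t') = r :: rs := by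
          cases hR : runsR (q :: t') with
          | nil => exact absurd hR (runsR_ne_nil q t')
          | cons r rs => exact ⟨r, rs, rfl⟩
        have hr1 : r.1 = q.1 := by
          have := runsR_head1 q t' ("", 0)
          rw [hr] at this; simpa using this
        rw [hr]
        simp only [List.tail_cons, List.zip_cons_cons, List.map_cons]
        have hseg : segOf (p, r) = segOf (p, q) := by simp [segOf, hr1]
        rw [hseg]
        have hrest := ih q
        rw [hr] at hrest
        simp only [List.tail_cons] at hrest ⊢
        rw [hrest]
        simp only [List.filter_cons]
        have : (decide (p.1 ≠ q.1)) = true := by simpa using h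
        rw [this]
        simp

lemma solution_alt_char (p : String × Int) (t : List (String × Int)) :
    solution_alt (p :: t)
      = p.1 ++ PySem.Str.join "" (((runsR (p :: t)).zip (runsR (p :: t)).tail).map segOf) := by
  unfold solution_alt
  rw [if_neg (List.cons_ne_nil p t)]
  simp only [runsOf_eq, List.singleton_append, join_cons]
  rw [runsR_head1]

-- ===== VERDICT (by name: the statement is the Claim_ definition above) =====
theorem solution_spec : Claim_equal_solution := by
  intro res _
  unfold Spec_solution
  cases res with
  | nil => rfl
  | cons p t =>
      rw [solution_char, solution_alt_char, segs_eq]
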